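-- pv_equiv track=rewrite | github.com/zq-zhan/Algorithm_updating | 202503贪心算法/20250323基本贪心策略/1-12摧毁小行星.py | asteroidsDestroyed
-- ===== SOURCE A (Python) =====
-- from bisect import bisect_right
--
-- def asteroidsDestroyed(mass, asteroids):
-- 	# n = len(asteroids)
-- 	asteroids.sort()
-- 	while len(asteroids) > 0:
-- 		i = bisect_right(asteroids, mass) - 1
-- 		if i < 0:
-- 			return False
-- 		mass += asteroids[i]
-- 		asteroids.pop(i)
-- 	return True
-- ===== SOURCE B (Python) =====
-- def asteroidsDestroyed(mass, asteroids):
--     # Greedy: an asteroid is destroyable exactly when its mass is <= ours.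
--     # Positive asteroids grow our mass, so destroy them first, smallest first;
--     # nonpositive ones shrink it, so leave them for last, largest first --
--     # if any destruction order succeeds, this one does.
--     gain = sorted(a for a in asteroids if a > 0)
--     cost = sorted((a for a in asteroids if a <= 0), reverse=True)
--     for a in gain + cost:
--         if a > mass:
--             return False
--         mass += a
--     return True
-- ===== Notes on version B (the rewrite author's own statement) =====
-- stated objective: faster
-- what changed: A repeatedly bisects for the largest asteroid <= mass and pops it from the list (an O(n) pop per step); B sorts once and makes a single linear pass (positive asteroids ascending, then nonpositive descending, the canonical greedy order), proved to reach the same verdict.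
import Mathlib
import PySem

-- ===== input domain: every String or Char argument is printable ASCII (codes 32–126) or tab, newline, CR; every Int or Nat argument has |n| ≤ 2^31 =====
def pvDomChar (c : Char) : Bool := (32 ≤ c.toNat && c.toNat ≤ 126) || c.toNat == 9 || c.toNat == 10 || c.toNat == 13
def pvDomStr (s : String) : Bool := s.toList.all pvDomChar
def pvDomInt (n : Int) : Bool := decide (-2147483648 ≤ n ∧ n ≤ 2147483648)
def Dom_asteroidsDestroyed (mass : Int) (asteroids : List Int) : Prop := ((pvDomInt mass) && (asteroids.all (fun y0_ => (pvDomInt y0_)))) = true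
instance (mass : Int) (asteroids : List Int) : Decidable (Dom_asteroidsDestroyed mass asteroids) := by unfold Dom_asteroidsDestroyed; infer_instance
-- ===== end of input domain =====

-- B sorts once and makes a single linear pass (positive asteroids ascending, then
-- nonpositive descending) instead of A's repeated bisect+pop scan; note A sorts/pops
-- its `asteroids` argument in place (B does not mutate) — the claim is about the return value.


-- ===== PORT A =====
-- while len(asteroids) > 0: i = bisect_right(asteroids, mass) - 1; if i < 0: return False;
--   mass += asteroids[i]; asteroids.pop(i)
-- (pop? returns both asteroids[i] and the popped list; the `none` branch is Python's
--  IndexError, unreachable here since 0 ≤ i < len.)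
def aLoop (mass : Int) (xs : List Int) : Bool :=
  if 0 < xs.length then
    let i : Int := (PySem.List.bisectRight xs mass : Int) - 1
    if i < 0 then false
    else
      match _hp : PySem.List.pop? xs i with
      | some (a, rest) =>
        have : rest.length < xs.length := by
          have h2 := PySem.List.length_of_pop?_eq_some xs _hp
          simp only [] at h2; omega
        aLoop (mass + a) rest
      | none => false
  else true
termination_by xs.length

-- asteroids.sort()  (in-place in Python; the loop then runs on the sorted list)
def asteroidsDestroyed (mass : Int) (asteroids : List Int) : Bool :=
  aLoop mass (PySem.List.sorted asteroids (fun x => x))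

-- ===== PORT B =====
-- for a in gain + cost: if a > mass: return False; mass += a
def bLoop (mass : Int) : List Int → Bool
  | [] => true
  | a :: t => if a > mass then false else bLoop (mass + a) t

-- gain = sorted(a for a in asteroids if a > 0); cost = sorted((a for a in asteroids if a <= 0), reverse=True)
def asteroidsDestroyed_alt (mass : Int) (asteroids : List Int) : Bool :=
  let gain := PySem.List.sorted (asteroids.filter (fun a => decide (0 < a))) (fun x => x)
  let cost := PySem.List.sorted (asteroids.filter (fun a => decide (a ≤ 0))) (fun x => x) true
  bLoop mass (gain ++ cost)

-- ===== PRECONDITION & SPEC =====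
def Spec_asteroidsDestroyed (mass : Int) (asteroids : List Int) (out : Bool) : Prop :=
  out = asteroidsDestroyed_alt mass asteroids
instance (mass : Int) (asteroids : List Int) (out : Bool) : Decidable (Spec_asteroidsDestroyed mass asteroids out) := by
  unfold Spec_asteroidsDestroyed; infer_instance

-- ===== CLAIM =====
def Claim_equal_asteroidsDestroyed : Prop :=
  ∀ (mass : Int) (asteroids : List Int), Dom_asteroidsDestroyed mass asteroids →
    Spec_asteroidsDestroyed mass asteroids (asteroidsDestroyed mass asteroids)

-- ===== LEMMAS AND PROOFS =====

-- B's traversal order, expressed over the fully sorted list (bridged to B's two sorts below)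
def seqB (xs : List Int) : List Int :=
  xs.filter (fun a => decide (0 < a)) ++ xs.reverse.filter (fun a => decide (a ≤ 0))

-- Exchange: removing a positive x ≤ mass from anywhere among elements ≤ mass
-- and adding it to the mass does not change bLoop's verdict.
lemma bLoop_exchange (x : Int) (hx : 0 < x) :
    ∀ (u : List Int) (m : Int) (v : List Int), x ≤ m → (∀ b ∈ u, 0 < b ∧ b ≤ m) →
      bLoop m (u ++ x :: v) = bLoop (m + x) (u ++ v) := by
  intro u
  induction u with
  | nil =>
    intro m v hxm _
    simp [bLoop, not_lt.mpr hxm]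
  | cons b u ih =>
    intro m v hxm hu
    have hb := hu b (by simp)
    have hbm : ¬ b > m := not_lt.mpr hb.2
    have hbmx : ¬ b > m + x := by omega
    simp only [List.cons_append, bLoop, if_neg hbm, if_neg hbmx]
    have := ih (m + b) v (by omega) (fun c hc => by
      have := hu c (by simp [hc]); omega)
    rw [this]
    have : m + b + x = m + x + b := by ring
    rw [this]

-- Removing a nonpositive x ≤ mass placed after a block of elements all > mass:
-- either the block's head already fails both runs, or the block is empty and
-- taking x is bLoop's own first step.
lemma bLoop_nonpos (x : Int) (hx : x ≤ 0) (w : List Int) (m : Int) (r : List Int)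
    (hxm : x ≤ m) (hw : ∀ b ∈ w, m < b) :
    bLoop m (w ++ x :: r) = bLoop (m + x) (w ++ r) := by
  cases w with
  | nil => simp [bLoop, not_lt.mpr hxm]
  | cons b w' =>
    have hb := hw b (by simp)
    simp [bLoop, hb, show m + x < b by omega]

lemma mem_take_le {xs : List Int} {n : Nat} {b : Int} (hb : b ∈ xs.take n)
    (m : Int) (h : ∀ (j : Nat) (hj : j < xs.length), j < n → xs[j] ≤ m) : b ≤ m := by
  obtain ⟨j, hj, hbe⟩ := List.mem_iff_getElem.mp hb
  have hmin : (xs.take n).length = min n xs.length := List.length_take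
  have hjl : j < xs.length := by omega
  have hjn : j < n := by omega
  have : (xs.take n)[j] = xs[j] := List.getElem_take
  rw [← hbe, this]
  exact h j hjl hjn

lemma mem_drop_gt {xs : List Int} {n : Nat} {b : Int} (hb : b ∈ xs.drop n)
    (m : Int) (h : ∀ (j : Nat) (hj : j < xs.length), n ≤ j → m < xs[j]) : m < b := by
  obtain ⟨j, hj, hbe⟩ := List.mem_iff_getElem.mp hb
  have hdl : (xs.drop n).length = xs.length - n := List.length_drop
  have hjl : n + j < xs.length := by omega
  have : (xs.drop n)[j] = xs[n + j] := List.getElem_drop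
  rw [← hbe, this]
  exact h (n + j) hjl (by omega)

-- Main invariant: on a sorted list, A's pop-the-largest-≤-mass loop agrees with
-- B's single pass in the order seqB.
lemma aLoop_eq_bLoop_seqB : ∀ (n : Nat) (xs : List Int) (m : Int), xs.length ≤ n →
    xs.Pairwise (· ≤ ·) → aLoop m xs = bLoop m (seqB xs) := by
  intro n
  induction n with
  | zero =>
    intro xs m hl _
    have : xs = [] := List.eq_nil_of_length_eq_zero (by omega)
    subst this
    rw [aLoop]
    simp [seqB, bLoop]
  | succ n ih =>
    intro xs m hl hsort
    by_cases hnil : xs = []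
    · subst hnil
      rw [aLoop]; simp [seqB, bLoop]
    · have hlen : 0 < xs.length := List.length_pos_iff.mpr hnil
      obtain ⟨hk_le, hk_lo, hk_hi⟩ := PySem.List.bisectRight_spec xs m hsort
      generalize hk : PySem.List.bisectRight xs m = k at hk_le hk_lo hk_hi
      by_cases hk0 : k = 0
      · -- nothing ≤ mass: A returns False at once; B's very first element is > mass
        have hall : ∀ b ∈ xs, m < b := by
          intro b hb
          obtain ⟨j, hj, hbe⟩ := List.mem_iff_getElem.mp hb
          rw [← hbe]; exact hk_hi j hj (by omega)
        have hA : aLoop m xs = false := by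
          rw [aLoop]
          simp only [if_pos hlen, hk]
          rw [if_pos (by rw [hk0]; norm_num)]
        rw [hA]
        cases hseq : seqB xs with
        | nil =>
          exfalso
          have ha : xs.head hnil ∈ xs := List.head_mem hnil
          have hmem : xs.head hnil ∈ seqB xs := by
            by_cases h : 0 < xs.head hnil
            · exact List.mem_append.mpr (Or.inl (List.mem_filter.mpr ⟨ha, by simp [h]⟩))
            · refine List.mem_append.mpr (Or.inr (List.mem_filter.mpr
                ⟨List.mem_reverse.mpr ha, by simp; omega⟩))
          rw [hseq] at hmem
          simp at hmem
        | cons h t =>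
          have hmem : h ∈ xs := by
            have : h ∈ seqB xs := by rw [hseq]; simp
            simp only [seqB, List.mem_append, List.mem_filter, List.mem_reverse] at this
            rcases this with ⟨h1, _⟩ | ⟨h1, _⟩ <;> exact h1
          have := hall h hmem
          simp [bLoop, this]
      · -- k ≥ 1: A pops x = xs[k-1], the largest element ≤ mass
        have hk1 : k - 1 < xs.length := by omega
        have hx_le : xs[k-1] ≤ m := hk_lo (k-1) hk1 (by omega)
        set x := xs[k-1] with hxdef
        have hk1' : 1 ≤ k := Nat.one_le_iff_ne_zero.mpr hk0
        have hcast : ((k : Int) - 1) = ((k - 1 : Nat) : Int) := by omega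
        have hpop : PySem.List.pop? xs ((k : Int) - 1) = some (x, xs.eraseIdx (k-1)) := by
          rw [hcast]; exact PySem.List.pop?_natCast xs (k-1) hk1
        have hA : aLoop m xs = aLoop (m + x) (xs.eraseIdx (k-1)) := by
          rw [aLoop]
          simp only [if_pos hlen, hk]
          rw [if_neg (by omega)]
          split
          · rename_i a rest heq
            rw [hk] at heq
            rw [heq] at hpop
            simp only [Option.some.injEq, Prod.mk.injEq] at hpop
            rw [hpop.1, hpop.2]
          · rename_i heq
            rw [hk] at heq
            rw [heq] at hpop
            simp at hpop
        -- decompose xs around index k-1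
        have hsucc : k - 1 + 1 = k := by omega
        have hdec : xs = xs.take (k-1) ++ x :: xs.drop k := by
          have h1 : xs[k-1] :: xs.drop (k-1+1) = xs.drop (k-1) :=
            List.getElem_cons_drop hk1
          rw [hsucc, ← hxdef] at h1
          conv_lhs => rw [← List.take_append_drop (k-1) xs, ← h1]
        have herase : xs.eraseIdx (k-1) = xs.take (k-1) ++ xs.drop k := by
          rw [List.eraseIdx_eq_take_drop_succ, hsucc]
        set T := xs.take (k-1) with hT
        set D := xs.drop k with hD
        have hTle : ∀ b ∈ T, b ≤ m := fun b hb =>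
          mem_take_le hb m (fun j hj hjn => hk_lo j hj (by omega))
        have hDgt : ∀ b ∈ D, m < b := fun b hb =>
          mem_drop_gt hb m (fun j hj hjn => hk_hi j hj hjn)
        have hlen' : (xs.eraseIdx (k-1)).length ≤ n := by
          rw [herase]
          simp only [List.length_append, hT, hD, List.length_take, List.length_drop]
          omega
        have hsort' : (xs.eraseIdx (k-1)).Pairwise (· ≤ ·) :=
          hsort.sublist (List.eraseIdx_sublist xs (k-1))
        have hIH := ih (xs.eraseIdx (k-1)) (m + x) hlen' hsort'
        rw [hA, hIH]
        -- it remains that B's verdicts agree: bLoop m (seqB xs) = bLoop (m+x) (seqB xs')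
        rw [herase]
        by_cases hxpos : 0 < x
        · -- x positive: exchange lemma with u = positives of T
          have hTpos_le : ∀ b ∈ T.filter (fun a => decide (0 < a)), 0 < b ∧ b ≤ m := by
            intro b hb
            rw [List.mem_filter] at hb
            exact ⟨by simpa using hb.2, hTle b hb.1⟩
          have lhs_eq : seqB xs =
              T.filter (fun a => decide (0 < a)) ++ x ::
                (D.filter (fun a => decide (0 < a)) ++
                 (D.reverse.filter (fun a => decide (a ≤ 0)) ++
                  T.reverse.filter (fun a => decide (a ≤ 0)))) := by
            conv_lhs => rw [seqB, hdec]
            simp [List.filter_append, List.reverse_append, hxpos, not_le.mpr hxpos,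
              List.append_assoc]
          have rhs_eq : seqB (T ++ D) =
              T.filter (fun a => decide (0 < a)) ++
                (D.filter (fun a => decide (0 < a)) ++
                 (D.reverse.filter (fun a => decide (a ≤ 0)) ++
                  T.reverse.filter (fun a => decide (a ≤ 0)))) := by
            simp [seqB, List.filter_append, List.reverse_append, List.append_assoc]
          rw [lhs_eq, rhs_eq]
          exact (bLoop_exchange x hxpos _ m _ hx_le hTpos_le).symm
        · -- x nonpositive: T is all ≤ x ≤ 0, D is all > m; both runs coincide
          have hxnp : x ≤ 0 := by omega
          have hTx : ∀ b ∈ T, b ≤ x := by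
            intro b hb
            obtain ⟨j, hj, hbe⟩ := List.mem_iff_getElem.mp hb
            have hmin : (xs.take (k-1)).length = min (k-1) xs.length := List.length_take
            rw [hT] at hj
            have hjl : j < xs.length := by omega
            have hjn : j < k - 1 := by omega
            have : T[j] = xs[j] := List.getElem_take
            rw [← hbe, this]
            exact List.pairwise_iff_getElem.mp hsort j (k-1) hjl hk1 (by omega)
          have hTposnil : T.filter (fun a => decide (0 < a)) = [] := by
            rw [List.filter_eq_nil_iff]
            intro b hb
            have := hTx b hb
            simp; omega
          have hTnp : T.reverse.filter (fun a => decide (a ≤ 0)) = T.reverse := by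
            rw [List.filter_eq_self]
            intro b hb
            rw [List.mem_reverse] at hb
            have := hTx b hb
            simp; omega
          have lhs_eq : seqB xs =
              (D.filter (fun a => decide (0 < a)) ++
               D.reverse.filter (fun a => decide (a ≤ 0))) ++ x :: T.reverse := by
            conv_lhs => rw [seqB, hdec]
            simp [List.filter_append, List.reverse_append, not_lt.mpr hxnp, hxnp,
              hTposnil, hTnp, List.append_assoc]
          have rhs_eq : seqB (T ++ D) =
              (D.filter (fun a => decide (0 < a)) ++
               D.reverse.filter (fun a => decide (a ≤ 0))) ++ T.reverse := by
            simp [seqB, List.filter_append, List.reverse_append, hTposnil, hTnp,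
              List.append_assoc]
          rw [lhs_eq, rhs_eq]
          refine (bLoop_nonpos x hxnp _ m _ hx_le ?_).symm
          intro b hb
          rw [List.mem_append] at hb
          rcases hb with hb | hb <;> rw [List.mem_filter] at hb
          · exact hDgt b hb.1
          · exact hDgt b (List.mem_reverse.mp hb.1)

-- B's sort-the-positives equals filtering the sorted list (stable sort, identity key)
lemma gain_eq (xs : List Int) :
    PySem.List.sorted (xs.filter (fun a => decide (0 < a))) (fun x => x) =
      (PySem.List.sorted xs (fun x => x)).filter (fun a => decide (0 < a)) := by
  refine PySem.List.sorted_id_eq_of_perm_of_pairwise _ _ ?_ ?_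
  · exact (PySem.List.sorted_perm xs (fun x => x) false).filter _
  · exact (PySem.List.sorted_pairwise xs (fun x => x)).sublist List.filter_sublist

-- B's reverse-sort of the nonpositives equals filtering the reversed sorted list
lemma cost_eq (xs : List Int) :
    PySem.List.sorted (xs.filter (fun a => decide (a ≤ 0))) (fun x => x) true =
      (PySem.List.sorted xs (fun x => x)).reverse.filter (fun a => decide (a ≤ 0)) := by
  refine List.Perm.eq_of_pairwise (le := fun a b : Int => b ≤ a)
    (fun a b _ _ h1 h2 => le_antisymm h2 h1) ?_ ?_ ?_
  · exact PySem.List.sorted_pairwise_rev _ _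
  · exact List.Pairwise.sublist List.filter_sublist
      ((List.pairwise_reverse).mpr (PySem.List.sorted_pairwise xs (fun x => x)))
  · exact ((PySem.List.sorted_perm _ _ true).trans
      ((PySem.List.sorted_perm xs (fun x => x) false).filter _).symm).trans
      ((PySem.List.sorted xs (fun x => x)).reverse_perm.filter _).symm

-- ===== VERDICT =====
theorem asteroidsDestroyed_spec : Claim_equal_asteroidsDestroyed := by
  intro mass asteroids _
  unfold Spec_asteroidsDestroyed asteroidsDestroyed asteroidsDestroyed_alt
  rw [gain_eq, cost_eq]
  exact aLoop_eq_bLoop_seqB _ _ mass le_rfl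
    (PySem.List.sorted_pairwise asteroids (fun x => x))
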